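-- pv_equiv track=rewrite | github.com/Ariling/SweetHellCTSudy | 프로그래머스/2/17687. ［3차］ n진수 게임/［3차］ n진수 게임.py | solution
-- ===== SOURCE A (Python) =====
-- def convert_base(num, base):
--     if num == 0:
--         return '0'
--     digits = '0123456789ABCDEF'
--     result = ''
--     while num:
--         result = digits[num % base] + result
--         num //= base
--     return result
--
-- def solution(n, t, m, p):
--     answer = ''
--     cnt = 0
--     num = 0
--     idx = 1
--
--     while cnt < t:
--         converted_num = convert_base(num, n)
--         for digit in converted_num:
--             if idx == p:
--                 answer += digit
--                 cnt += 1
--                 if cnt == t: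
--                     break
--             idx += 1
--             if idx > m:
--                 idx = 1
--         if cnt == t:
--             break
--         num += 1
--
--     return answer
-- ===== SOURCE B (Python) =====
-- def convert_base(num, base):
--     digits = '0123456789ABCDEF'
--     if num < base:
--         return digits[num]
--     return convert_base(num // base, base) + digits[num % base]
--
-- def solution(n, t, m, p):
--     if t <= 0:
--         return ''
--     last = p - 1 + (t - 1) * m   # index of the last digit player p needs
--     s = ''
--     i = 0
--     while len(s) <= last:
--         s += convert_base(i, n)
--         i += 1
--     return s[p-1::m][:t]
-- ===== Notes on version B (the rewrite author's own statement) =====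
-- stated objective: simpler
-- what changed: B drops A's rotating idx counter and per-digit branching entirely: it concatenates the n-ary representations until the index of the last digit player p needs is covered, then extracts the answer with one strided slice s[p-1::m][:t].
-- outside the precondition, e.g. on solution(10, 3, 0, 1): A returns '012', B raises ValueError; on solution(10, 3, -2, 1): A returns '012', B returns ''; on solution(20, 1, 1, 1): A returns '0', B returns '0'
import Mathlib
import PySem

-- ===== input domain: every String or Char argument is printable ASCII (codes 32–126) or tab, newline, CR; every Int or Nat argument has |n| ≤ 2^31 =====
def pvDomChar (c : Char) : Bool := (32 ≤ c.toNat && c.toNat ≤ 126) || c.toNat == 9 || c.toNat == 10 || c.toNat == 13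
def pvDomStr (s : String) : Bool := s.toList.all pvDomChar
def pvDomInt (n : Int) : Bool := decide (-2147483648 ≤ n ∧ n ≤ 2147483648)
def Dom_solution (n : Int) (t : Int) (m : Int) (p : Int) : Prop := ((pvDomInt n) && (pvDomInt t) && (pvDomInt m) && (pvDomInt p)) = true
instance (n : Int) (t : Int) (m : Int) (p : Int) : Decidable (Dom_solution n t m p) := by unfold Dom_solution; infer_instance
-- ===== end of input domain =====

-- B replaces A's rotating idx counter and per-digit branch by a build-then-strided-slice decomposition (objective: simpler); return values proved equal on Pre_.

-- ===== PORT A =====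
-- Python strings are ported as List Char (wrapped into String at the end); PySem.Str-free since
-- only concatenation and single-character indexing occur.
def pvDigits : List Char := ['0','1','2','3','4','5','6','7','8','9','A','B','C','D','E','F']

-- 'while num: result = digits[num % base] + result; num //= base' — fuel num.toNat+1 only totalizes
-- the loop (sufficient whenever base ≥ 2); digits[·] via pyGetD (in range on Pre_, where 2 ≤ base ≤ 16).
def pvConvLoopA : Nat → Int → Int → List Char → List Char
  | 0, _, _, result => result
  | fuel + 1, num, base, result =>
    if num ≠ 0 then
      pvConvLoopA fuel (PySem.Int.floordiv num base) base
        (PySem.List.pyGetD pvDigits (PySem.Int.mod num base) '?' :: result)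
    else result

def pvConvertBaseA (num base : Int) : List Char :=
  if num = 0 then ['0'] else pvConvLoopA (num.toNat + 1) num base []

-- the inner 'for digit in converted_num' loop, returning (answer, cnt, idx)
def pvInnerA (t m p : Int) : List Char → List Char → Int → Int → (List Char × Int × Int)
  | [], answer, cnt, idx => (answer, cnt, idx)
  | d :: rest, answer, cnt, idx =>
    if idx = p then
      let answer := answer ++ [d]
      let cnt := cnt + 1
      if cnt = t then (answer, cnt, idx)   -- break; outer 'if cnt == t' then exits
      else
        let idx := idx + 1
        let idx := if idx > m then 1 else idx
        pvInnerA t m p rest answer cnt idx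
    else
      let idx := idx + 1
      let idx := if idx > m then 1 else idx
      pvInnerA t m p rest answer cnt idx

-- the outer 'while cnt < t' loop; fuel (t*m).toNat + 2 only totalizes it (sufficient on Pre_)
def pvOuterA (n t m p : Int) : Nat → List Char → Int → Int → Int → List Char
  | 0, answer, _, _, _ => answer
  | fuel + 1, answer, cnt, num, idx =>
    if cnt < t then
      let conv := pvConvertBaseA num n
      let r := pvInnerA t m p conv answer cnt idx
      if r.2.1 = t then r.1
      else pvOuterA n t m p fuel r.1 r.2.1 (num + 1) r.2.2
    else answer

def solution (n : Int) (t : Int) (m : Int) (p : Int) : String :=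
  String.ofList (pvOuterA n t m p ((t * m).toNat + 2) [] 0 0 1)

-- ===== PORT B =====
-- 'if num < base: return digits[num]; return convert_base(num // base, base) + digits[num % base]'
-- — fuel num.toNat+1 only totalizes the recursion (sufficient whenever base ≥ 2).
def pvConvB : Nat → Int → Int → List Char
  | 0, _, _ => []
  | fuel + 1, num, base =>
    if num < base then [PySem.List.pyGetD pvDigits num '?']
    else pvConvB fuel (PySem.Int.floordiv num base) base ++
         [PySem.List.pyGetD pvDigits (PySem.Int.mod num base) '?']

def pvConvertBaseB (num base : Int) : List Char := pvConvB (num.toNat + 1) num base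

-- 'while len(s) <= last: s += convert_base(i, n); i += 1' — fuel last.toNat + 2 only totalizes it
def pvBuildB (n last : Int) : Nat → List Char → Int → List Char
  | 0, s, _ => s
  | fuel + 1, s, i =>
    if (s.length : Int) ≤ last then pvBuildB n last fuel (s ++ pvConvertBaseB i n) (i + 1)
    else s

-- hand port of the extended slice s[start::step] (PySem.List.slice has no step): exact for
-- step ≥ 1 and start ≥ 0, and on the empty string for any step — all that Pre_ admits.
def pvEveryN (step : Nat) : List Char → List Char
  | [] => []
  | c :: rest => c :: pvEveryN step (rest.drop (step - 1))
  termination_by l => l.length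
  decreasing_by simp only [List.length_cons, List.length_drop]; omega

def solution_alt (n : Int) (t : Int) (m : Int) (p : Int) : String :=
  if t ≤ 0 then String.ofList []
  else
    let last := p - 1 + (t - 1) * m
    let s := pvBuildB n last (last.toNat + 2) [] 0
    String.ofList (PySem.List.slice (pvEveryN m.toNat (s.drop (p - 1).toNat)) none (some t))

-- ===== PRECONDITION & SPEC =====
-- Pre_ is the problem's natural domain (base 2 ≤ n ≤ 16 and a player 1 ≤ p ≤ m), plus every
-- degenerate t ≤ 0 input, on which A asks for no digits and returns ''. Outside it A raises
-- (IndexError for a digit ≥ 16 when n > 16, ZeroDivisionError for n = 0) or loops forever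
-- (p > m with t > 0, n = 1), except on some m ≤ 0 / p > m / n > 16 inputs with t > 0 where A
-- still returns a value but B raises ValueError (slice step 0) or reads the strided slice
-- differently — see claim.json cites for one input of each kind.
def Pre_solution (n : Int) (t : Int) (m : Int) (p : Int) : Prop :=
  (2 ≤ n ∧ n ≤ 16 ∧ 1 ≤ p ∧ p ≤ m) ∨ t ≤ 0
instance (n : Int) (t : Int) (m : Int) (p : Int) : Decidable (Pre_solution n t m p) := by
  unfold Pre_solution; infer_instance

def pvWitness_solution : Int × Int × Int × Int := (2, 4, 2, 1)

def Spec_solution (n : Int) (t : Int) (m : Int) (p : Int) (out : String) : Prop := out = solution_alt n t m p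
instance (n : Int) (t : Int) (m : Int) (p : Int) (out : String) : Decidable (Spec_solution n t m p out) := by unfold Spec_solution; infer_instance

-- ===== CLAIM (what is proved, stated in full; the proofs are below) =====
def Claim_equal_solution : Prop := ∀ (n : Int) (t : Int) (m : Int) (p : Int), Dom_solution n t m p → Pre_solution n t m p → Spec_solution n t m p (solution n t m p)

-- ===== LEMMAS AND PROOFS =====

-- canonical form of both convert_base implementations
def pvCv (b : Nat) (k : Nat) : List Char :=
  if _h : k < b ∨ b ≤ 1 then [pvDigits.getD k '?']
  else pvCv b (k / b) ++ [pvDigits.getD (k % b) '?']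
  decreasing_by exact Nat.div_lt_self (by omega) (by omega)

-- word k of the stream, and the stream's first K words
def pvW (n : Int) (k : Nat) : List Char := pvConvertBaseB (↑k) n
def pvS (n : Int) : Nat → List Char
  | 0 => []
  | K + 1 => pvS n K ++ pvW n K

-- residue bookkeeping: position j in the stream carries idx = (j mod m) + 1; r = idx - 1
def pvStep (mn r : Nat) : Nat := if r + 1 = mn then 0 else r + 1
-- the hit characters (where idx = p) of a chunk starting at residue r
def pvHits (mn pn : Nat) : Nat → List Char → List Char
  | _, [] => []
  | r, c :: w => (if r = pn - 1 then [c] else []) ++ pvHits mn pn (pvStep mn r) w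
-- residue after a chunk
def pvRA (mn : Nat) : Nat → List Char → Nat
  | r, [] => r
  | r, _ :: w => pvRA mn (pvStep mn r) w
-- steps from residue r to the next hit
def pvDist (mn pn r : Nat) : Nat := if r ≤ pn - 1 then pn - 1 - r else mn - r + (pn - 1)

theorem pvEveryN_nil (st : Nat) : pvEveryN st [] = [] := by
  rw [pvEveryN]

theorem pvEveryN_cons (st : Nat) (c : Char) (rest : List Char) :
    pvEveryN st (c :: rest) = c :: pvEveryN st (rest.drop (st - 1)) := by
  rw [pvEveryN]

theorem pvConvB_eq_cv (b : Nat) (hb : 2 ≤ b) :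
    ∀ (f k : Nat), k < f → pvConvB f (↑k) (↑b) = pvCv b k := by
  intro f
  induction f with
  | zero => omega
  | succ f ih =>
    intro k hk
    rw [pvConvB, pvCv]
    by_cases h : k < b
    · rw [if_pos (by exact_mod_cast h), dif_pos (Or.inl h), PySem.List.pyGetD_natCast]
    · have hdl : k / b < k := Nat.div_lt_self (by omega) (by omega)
      rw [if_neg (by exact_mod_cast h), dif_neg (by omega), PySem.Int.floordiv_natCast,
        PySem.Int.mod_natCast, PySem.List.pyGetD_natCast, ih (k / b) (by omega)]

theorem pvConvLoopA_eq_cv (b : Nat) (hb : 2 ≤ b) :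
    ∀ (f k : Nat), 0 < k → k < f → ∀ (acc : List Char),
      pvConvLoopA f (↑k) (↑b) acc = pvCv b k ++ acc := by
  intro f
  induction f with
  | zero => omega
  | succ f ih =>
    intro k hk hkf acc
    rw [pvConvLoopA, if_pos (by exact_mod_cast (by omega : (k : Int) ≠ 0)),
      PySem.Int.floordiv_natCast, PySem.Int.mod_natCast, PySem.List.pyGetD_natCast]
    by_cases h : k < b
    · have hdiv : k / b = 0 := Nat.div_eq_of_lt h
      rw [hdiv]
      obtain ⟨f', rfl⟩ := Nat.exists_eq_succ_of_ne_zero (by omega : f ≠ 0)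
      rw [pvConvLoopA, if_neg (by simp)]
      rw [pvCv, dif_pos (Or.inl h), Nat.mod_eq_of_lt h]
      rfl
    · have hdl : k / b < k := Nat.div_lt_self (by omega) (by omega)
      have h1 : 0 < k / b := Nat.div_pos (by omega) (by omega)
      have h2 : k / b < f := by omega
      rw [ih (k / b) h1 h2]
      conv_rhs => rw [pvCv, dif_neg (by omega)]
      simp

theorem pvConvA_eq_cv (b k : Nat) (hb : 2 ≤ b) : pvConvertBaseA (↑k) (↑b) = pvCv b k := by
  rw [pvConvertBaseA]
  by_cases h : k = 0
  · subst h
    rw [if_pos (by norm_num), pvCv, dif_pos (Or.inl (by omega))]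
    rfl
  · rw [if_neg (by exact_mod_cast h), Int.toNat_natCast]
    simpa using pvConvLoopA_eq_cv b hb (k + 1) k (by omega) (by omega) []

theorem pvConvB_eq_cv' (b k : Nat) (hb : 2 ≤ b) : pvConvertBaseB (↑k) (↑b) = pvCv b k := by
  rw [pvConvertBaseB, Int.toNat_natCast]
  exact pvConvB_eq_cv b hb (k + 1) k (by omega)

theorem pvCv_ne_nil (b k : Nat) : pvCv b k ≠ [] := by
  rw [pvCv]; split <;> simp

-- word = canonical form, nonempty
theorem pvW_eq (n : Int) (hn : 2 ≤ n) (k : Nat) : pvW n k = pvCv n.toNat k := by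
  have : n = ↑n.toNat := by omega
  rw [pvW, this]; exact pvConvB_eq_cv' n.toNat k (by omega)

theorem pvW_ne_nil (n : Int) (hn : 2 ≤ n) (k : Nat) : pvW n k ≠ [] := by
  rw [pvW_eq n hn]; exact pvCv_ne_nil _ _

-- residue lemmas
theorem pvStep_lt (mn r : Nat) (hm : 1 ≤ mn) (hr : r < mn) : pvStep mn r < mn := by
  rw [pvStep]; split <;> omega

theorem pvRA_lt (mn : Nat) (hm : 1 ≤ mn) :
    ∀ (w : List Char) (r : Nat), r < mn → pvRA mn r w < mn := by
  intro w
  induction w with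
  | nil => intro r hr; exact hr
  | cons c w ih => intro r hr; exact ih _ (pvStep_lt mn r hm hr)

theorem pvHits_append (mn pn : Nat) :
    ∀ (u v : List Char) (r : Nat),
      pvHits mn pn r (u ++ v) = pvHits mn pn r u ++ pvHits mn pn (pvRA mn r u) v := by
  intro u
  induction u with
  | nil => intro v r; rfl
  | cons c u ih => intro v r; simp [pvHits, pvRA, ih]

theorem pvRA_append (mn : Nat) :
    ∀ (u v : List Char) (r : Nat), pvRA mn r (u ++ v) = pvRA mn (pvRA mn r u) v := by
  intro u
  induction u with
  | nil => intro v r; rfl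
  | cons c u ih => intro v r; simp [pvRA, ih]

theorem pvDist_step (mn pn r : Nat) (hp : 1 ≤ pn) (hpm : pn ≤ mn) (hr : r < mn)
    (hne : r ≠ pn - 1) : pvDist mn pn (pvStep mn r) = pvDist mn pn r - 1 ∧ 1 ≤ pvDist mn pn r := by
  simp only [pvDist, pvStep]; split_ifs <;> omega

theorem pvDist_hit (mn pn : Nat) (hp : 1 ≤ pn) (hpm : pn ≤ mn) :
    pvDist mn pn (pvStep mn (pn - 1)) = mn - 1 := by
  simp only [pvDist, pvStep]; split_ifs <;> omega

-- lower bound on the number of hits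
theorem pvHits_len (mn pn : Nat) (hp : 1 ≤ pn) (hpm : pn ≤ mn) :
    ∀ (s : List Char) (r tn : Nat), r < mn →
      pvDist mn pn r + 1 + tn * mn ≤ s.length →
      tn + 1 ≤ (pvHits mn pn r s).length := by
  intro s
  induction s with
  | nil => intro r tn hr hlen; simp [pvDist] at hlen
  | cons c w ih =>
    intro r tn hr hlen
    by_cases h : r = pn - 1
    · subst h
      rw [pvHits, if_pos rfl]
      rcases tn with _ | tn'
      · simp
      · have h1 : pvDist mn pn (pvStep mn (pn - 1)) + 1 + tn' * mn ≤ w.length := by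
          rw [pvDist_hit mn pn hp hpm]
          have hd0 : pvDist mn pn (pn - 1) = 0 := by rw [pvDist]; split <;> omega
          rw [hd0] at hlen
          simp at hlen
          have : (tn' + 1) * mn = tn' * mn + mn := by ring
          omega
        have := ih (pvStep mn (pn - 1)) tn' (pvStep_lt mn _ (by omega) hr) h1
        simp; omega
    · rw [pvHits, if_neg h]
      obtain ⟨hstep, hge⟩ := pvDist_step mn pn r hp hpm hr h
      have h1 : pvDist mn pn (pvStep mn r) + 1 + tn * mn ≤ w.length := by
        simp at hlen; omega
      simpa using ih (pvStep mn r) tn (pvStep_lt mn _ (by omega) hr) h1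

-- hits = strided slice
theorem pvHits_eq_everyN (mn pn : Nat) (hp : 1 ≤ pn) (hpm : pn ≤ mn) :
    ∀ (s : List Char) (r : Nat), r < mn →
      pvHits mn pn r s = pvEveryN mn (s.drop (pvDist mn pn r)) := by
  intro s
  induction s with
  | nil => intro r hr; simp [pvHits, pvEveryN_nil]
  | cons c w ih =>
    intro r hr
    by_cases h : r = pn - 1
    · subst h
      have hd0 : pvDist mn pn (pn - 1) = 0 := by rw [pvDist]; split <;> omega
      rw [pvHits, if_pos rfl, hd0, List.drop_zero, pvEveryN_cons]
      rw [ih (pvStep mn (pn - 1)) (pvStep_lt mn _ (by omega) hr)]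
      rw [pvDist_hit mn pn hp hpm]
      simp
    · rw [pvHits, if_neg h]
      obtain ⟨hstep, hge⟩ := pvDist_step mn pn r hp hpm hr h
      rw [ih (pvStep mn r) (pvStep_lt mn _ (by omega) hr), hstep]
      have : pvDist mn pn r = (pvDist mn pn r - 1) + 1 := by omega
      rw [this, List.drop_succ_cons]
      simp

-- taking tn hits is stable under extending the stream
theorem pvHits_take_append (mn pn tn : Nat) (s u : List Char)
    (h : tn ≤ (pvHits mn pn 0 s).length) :
    (pvHits mn pn 0 (s ++ u)).take tn = (pvHits mn pn 0 s).take tn := by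
  rw [pvHits_append, List.take_append, Nat.sub_eq_zero_of_le h]
  simp

theorem pvS_le (n : Int) : ∀ (K1 K2 : Nat), K1 ≤ K2 → ∃ u, pvS n K2 = pvS n K1 ++ u := by
  intro K1 K2 h
  induction K2 with
  | zero => exact ⟨[], by simp [show K1 = 0 by omega]⟩
  | succ K ih =>
    by_cases hK : K1 = K + 1
    · exact ⟨[], by simp [hK]⟩
    · obtain ⟨u, hu⟩ := ih (by omega)
      exact ⟨u ++ pvW n K, by simp [pvS, hu]⟩

-- the common value: any stream prefix with at least tn hits gives the same first tn hits
theorem pvHits_take_stable (mn pn tn : Nat) (n : Int) (K1 K2 : Nat)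
    (h1 : tn ≤ (pvHits mn pn 0 (pvS n K1)).length)
    (h2 : tn ≤ (pvHits mn pn 0 (pvS n K2)).length) :
    (pvHits mn pn 0 (pvS n K1)).take tn = (pvHits mn pn 0 (pvS n K2)).take tn := by
  rcases Nat.le_total K1 K2 with h | h
  · obtain ⟨u, hu⟩ := pvS_le n K1 K2 h
    rw [hu, pvHits_take_append mn pn tn _ _ h1]
  · obtain ⟨u, hu⟩ := pvS_le n K2 K1 h
    rw [hu, pvHits_take_append mn pn tn _ _ h2]

-- ===== A-side loop characterisation =====

theorem pvInnerA_spec (t m p : Int) (hp : 1 ≤ p) (_hpm : p ≤ m) :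
    ∀ (w ans : List Char) (cnt : Int) (r : Nat), r < m.toNat → 0 ≤ cnt → cnt < t →
      (pvInnerA t m p w ans cnt ((r : Int) + 1)).1
          = ans ++ (pvHits m.toNat p.toNat r w).take (t - cnt).toNat ∧
      (pvInnerA t m p w ans cnt ((r : Int) + 1)).2.1
          = min t (cnt + ((pvHits m.toNat p.toNat r w).length : Int)) ∧
      (min t (cnt + ((pvHits m.toNat p.toNat r w).length : Int)) < t →
        (pvInnerA t m p w ans cnt ((r : Int) + 1)).2.2 = ((pvRA m.toNat r w : Nat) : Int) + 1) := by
  intro w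
  induction w with
  | nil =>
    intro ans cnt r hr hc0 hct
    refine ⟨by simp [pvInnerA, pvHits], by simp [pvInnerA, pvHits]; omega, ?_⟩
    intro _
    simp [pvInnerA, pvRA]
  | cons c w ih =>
    intro ans cnt r hr hc0 hct
    have hidx_step : (if ((r : Int) + 1) + 1 > m then (1 : Int) else ((r : Int) + 1) + 1)
        = ((pvStep m.toNat r : Nat) : Int) + 1 := by
      simp only [pvStep]
      split_ifs <;> omega
    by_cases hcase : r = p.toNat - 1
    · have hidx : ((r : Int) + 1) = p := by omega
      have hhits : pvHits m.toNat p.toNat r (c :: w)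
          = c :: pvHits m.toNat p.toNat (pvStep m.toNat r) w := by
        simp [pvHits, hcase]
      simp only [pvInnerA, if_pos hidx, hhits]
      by_cases hcteq : cnt + 1 = t
      · rw [if_pos hcteq]
        have htc1 : (t - cnt).toNat = 1 := by omega
        refine ⟨by simp [htc1], ?_, ?_⟩
        · have : t ≤ cnt + ((c :: pvHits m.toNat p.toNat (pvStep m.toNat r) w).length : Int) := by
            simp only [List.length_cons]
            push_cast
            omega
          simp only [List.length_cons]
          push_cast at this ⊢
          omega
        · intro hlt
          simp only [List.length_cons] at hlt
          push_cast at hlt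
          omega
      · rw [if_neg hcteq]
        have hc1t : cnt + 1 < t := by omega
        rw [hidx_step]
        obtain ⟨ih1, ih2, ih3⟩ :=
          ih (ans ++ [c]) (cnt + 1) (pvStep m.toNat r)
            (pvStep_lt m.toNat r (by omega) hr) (by omega) hc1t
        have hRA : pvRA m.toNat r (c :: w) = pvRA m.toNat (pvStep m.toNat r) w := by
          simp [pvRA]
        have hlen : cnt + ((c :: pvHits m.toNat p.toNat (pvStep m.toNat r) w).length : Int)
            = (cnt + 1) + ((pvHits m.toNat p.toNat (pvStep m.toNat r) w).length : Int) := by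
          simp only [List.length_cons]
          push_cast
          ring
        refine ⟨?_, ?_, ?_⟩
        · rw [ih1]
          have hts : (t - cnt).toNat = (t - (cnt + 1)).toNat + 1 := by omega
          simp [hts]
        · rw [ih2, hlen]
        · intro hlt
          rw [hRA]
          exact ih3 (by rw [hlen] at hlt; exact hlt)
    · have hidx : ¬ ((r : Int) + 1 = p) := by omega
      have hhits : pvHits m.toNat p.toNat r (c :: w)
          = pvHits m.toNat p.toNat (pvStep m.toNat r) w := by
        simp [pvHits, hcase]
      have hRA : pvRA m.toNat r (c :: w) = pvRA m.toNat (pvStep m.toNat r) w := by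
        simp [pvRA]
      simp only [pvInnerA, if_neg hidx, hhits, hRA, hidx_step]
      exact ih ans cnt (pvStep m.toNat r) (pvStep_lt m.toNat r (by omega) hr) hc0 hct

theorem pvConvA_eq_W (n : Int) (hn : 2 ≤ n) (k : Nat) :
    pvConvertBaseA ((k : Nat) : Int) n = pvW n k := by
  have hn' : n = ((n.toNat : Nat) : Int) := by omega
  rw [pvW_eq n hn, hn']
  exact pvConvA_eq_cv n.toNat k (by omega)

theorem pvOuterA_spec (n t m p : Int) (hn : 2 ≤ n) (hp : 1 ≤ p) (hpm : p ≤ m) (ht : 1 ≤ t) :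
    ∀ (f k : Nat) (ans : List Char) (cnt idx : Int),
      ans = (pvHits m.toNat p.toNat 0 (pvS n k)).take t.toNat →
      cnt = min t ((pvHits m.toNat p.toNat 0 (pvS n k)).length : Int) →
      idx = ((pvRA m.toNat 0 (pvS n k) : Nat) : Int) + 1 →
      (p.toNat - 1) + (t.toNat - 1) * m.toNat + 1 ≤ (pvS n k).length + f →
      ∃ K, t.toNat ≤ (pvHits m.toNat p.toNat 0 (pvS n K)).length ∧
        pvOuterA n t m p f ans cnt ((k : Nat) : Int) idx =
          (pvHits m.toNat p.toNat 0 (pvS n K)).take t.toNat := by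
  intro f
  induction f with
  | zero =>
    intro k ans cnt idx hans hcnt hidx hfuel
    refine ⟨k, ?_, hans⟩
    have := pvHits_len m.toNat p.toNat (by omega) (by omega) (pvS n k) 0 (t.toNat - 1)
      (by omega) (by simp only [pvDist, if_pos (by omega : (0:Nat) ≤ p.toNat - 1)]; omega)
    omega
  | succ f ih =>
    intro k ans cnt idx hans hcnt hidx hfuel
    rw [pvOuterA]
    by_cases hdone : t.toNat ≤ (pvHits m.toNat p.toNat 0 (pvS n k)).length
    · -- cnt = t already: the loop guard fails and the invariant answer is final
      have hcnt_t : cnt = t := by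
        rw [hcnt]
        omega
      rw [if_neg (by omega)]
      exact ⟨k, hdone, hans⟩
    · have hlen_lt : (pvHits m.toNat p.toNat 0 (pvS n k)).length < t.toNat := by omega
      have hcnt_eq : cnt = ((pvHits m.toNat p.toNat 0 (pvS n k)).length : Int) := by
        rw [hcnt]; omega
      rw [if_pos (by omega)]
      rw [pvConvA_eq_W n hn k]
      -- the inner loop over word k
      have hr0 : 0 < m.toNat := by omega
      obtain ⟨ih1, ih2, ih3⟩ :=
        pvInnerA_spec t m p hp hpm (pvW n k) ans cnt (pvRA m.toNat 0 (pvS n k))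
          (pvRA_lt m.toNat (by omega) (pvS n k) 0 hr0) (by omega) (by omega)
      rw [← hidx] at ih1 ih2 ih3
      -- the stream grows by word k
      have hSsucc : pvS n (k + 1) = pvS n k ++ pvW n k := rfl
      have hH : pvHits m.toNat p.toNat 0 (pvS n (k + 1))
          = pvHits m.toNat p.toNat 0 (pvS n k)
            ++ pvHits m.toNat p.toNat (pvRA m.toNat 0 (pvS n k)) (pvW n k) := by
        rw [hSsucc, pvHits_append]
      have hans_full : ans = pvHits m.toNat p.toNat 0 (pvS n k) := by
        rw [hans, List.take_of_length_le (by omega)]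
      by_cases hstop :
          min t (cnt + ((pvHits m.toNat p.toNat (pvRA m.toNat 0 (pvS n k)) (pvW n k)).length : Int)) = t
      · rw [if_pos (by rw [ih2, hstop])]
        refine ⟨k + 1, ?_, ?_⟩
        · rw [hH]
          simp only [List.length_append]
          omega
        · have hsum : t ≤ cnt + ((pvHits m.toNat p.toNat (pvRA m.toNat 0 (pvS n k)) (pvW n k)).length : Int) := by
            omega
          rw [ih1, hans_full, hH]
          conv_rhs => rw [List.take_append]
          rw [List.take_of_length_le (l := pvHits m.toNat p.toNat 0 (pvS n k)) (by omega)]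
          have hix : (t - cnt).toNat
              = t.toNat - (pvHits m.toNat p.toNat 0 (pvS n k)).length := by omega
          rw [hix]
      · rw [if_neg (by rw [ih2]; exact hstop)]
        have hmin_lt :
            min t (cnt + ((pvHits m.toNat p.toNat (pvRA m.toNat 0 (pvS n k)) (pvW n k)).length : Int)) < t := by
          omega
        have hsum_lt : cnt + ((pvHits m.toNat p.toNat (pvRA m.toNat 0 (pvS n k)) (pvW n k)).length : Int) < t := by
          omega
        have htail_full :
            (pvHits m.toNat p.toNat (pvRA m.toNat 0 (pvS n k)) (pvW n k)).take (t - cnt).toNat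
              = pvHits m.toNat p.toNat (pvRA m.toNat 0 (pvS n k)) (pvW n k) := by
          apply List.take_of_length_le
          omega
        have hnum : ((k : Nat) : Int) + 1 = (((k + 1 : Nat) : Nat) : Int) := by push_cast; ring
        rw [ih1, ih2, hnum]
        have hW1 : 1 ≤ (pvW n k).length := by
          cases hW : pvW n k with
          | nil => exact absurd hW (pvW_ne_nil n hn k)
          | cons a l => simp
        apply ih (k + 1)
        · have hle : (pvHits m.toNat p.toNat 0 (pvS n (k + 1))).length ≤ t.toNat := by
            rw [hH]
            simp only [List.length_append]
            omega
          rw [hans_full, htail_full, ← hH, List.take_of_length_le hle]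
        · rw [hH]
          simp only [List.length_append]
          push_cast
          omega
        · rw [ih3 hmin_lt, hSsucc, pvRA_append]
        · rw [hSsucc]
          simp only [List.length_append]
          omega

-- ===== B-side loop characterisation =====

theorem pvBuildB_spec (n last : Int) (hn : 2 ≤ n) :
    ∀ (f i : Nat), last < ((pvS n i).length : Int) + (f : Int) →
      ∃ K, last < ((pvS n K).length : Int) ∧ pvBuildB n last f (pvS n i) (↑i) = pvS n K := by
  intro f
  induction f with
  | zero =>
    intro i h
    exact ⟨i, by simpa using h, rfl⟩
  | succ f ih =>
    intro i h
    rw [pvBuildB]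
    by_cases hc : ((pvS n i).length : Int) ≤ last
    · rw [if_pos hc]
      have hW : 1 ≤ (pvW n i).length := by
        cases hW : pvW n i with
        | nil => exact absurd hW (pvW_ne_nil n hn i)
        | cons a l => simp
      have hgrow : (pvS n i).length + 1 ≤ (pvS n (i + 1)).length := by
        simp [pvS]; omega
      have hstep : (pvS n i) ++ pvConvertBaseB (↑i) n = pvS n (i + 1) := rfl
      rw [hstep, (by push_cast; ring : ((i : Nat) : Int) + 1 = ((i + 1 : Nat) : Int))]
      exact ih (i + 1) (by push_cast at h ⊢; omega)
    · rw [if_neg hc]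
      exact ⟨i, by omega, rfl⟩

-- slice of the empty list
-- degenerate cases: A returns '' as soon as t ≤ 0, B as soon as the needed length is ≤ 0
theorem solution_A_neg (n t m p : Int) (ht : t ≤ 0) : solution n t m p = String.ofList [] := by
  unfold solution
  have h2 : (t * m).toNat + 2 = ((t * m).toNat + 1) + 1 := rfl
  rw [h2, pvOuterA, if_neg (by omega : ¬ ((0 : Int) < t))]

theorem solution_B_neg (n t m p : Int) (ht : t ≤ 0) :
    solution_alt n t m p = String.ofList [] := by
  unfold solution_alt
  rw [if_pos ht]

-- main case: both sides compute the first t strided characters of the digit stream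
theorem solution_eq_pos (n t m p : Int) (hn2 : 2 ≤ n) (hp1 : 1 ≤ p) (hpm : p ≤ m)
    (ht : 1 ≤ t) : solution n t m p = solution_alt n t m p := by
  have hm1 : 1 ≤ m := le_trans hp1 hpm
  have hpn : p = ((p.toNat : Nat) : Int) := by omega
  have htn : t = ((t.toNat : Nat) : Int) := by omega
  have hmn : m = ((m.toNat : Nat) : Int) := by omega
  have hpn1 : 1 ≤ p.toNat := by omega
  have hpmn : p.toNat ≤ m.toNat := by omega
  have htn1 : 1 ≤ t.toNat := by omega
  have hprod : (t - 1) * m = (((t.toNat - 1) * m.toNat : Nat) : Int) := by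
    rw [Nat.cast_mul, Nat.cast_sub htn1, Nat.cast_one, ← htn, ← hmn]
  have hprodm : (t.toNat - 1) * m.toNat + m.toNat = t.toNat * m.toNat := by
    rw [Nat.sub_one_mul]
    have : m.toNat ≤ t.toNat * m.toNat := Nat.le_mul_of_pos_left _ (by omega)
    omega
  have htm : (t * m).toNat = t.toNat * m.toNat := by
    conv_lhs => rw [htn, hmn, ← Nat.cast_mul]
    rw [Int.toNat_natCast]
  -- A side
  obtain ⟨K1, hK1, hA⟩ :=
    pvOuterA_spec n t m p hn2 hp1 hpm ht ((t * m).toNat + 2) 0 [] 0 1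
      (by simp [pvS, pvHits])
      (by simp [pvS, pvHits]; omega)
      (by simp [pvS, pvRA])
      (by have hs : (pvS n 0).length = 0 := rfl
          rw [hs, htm]; omega)
  have hA' : pvOuterA n t m p ((t * m).toNat + 2) [] 0 0 1
      = (pvHits m.toNat p.toNat 0 (pvS n K1)).take t.toNat := by
    simpa using hA
  -- B side
  have hlast0 : 0 ≤ (t - 1) * m := mul_nonneg (by omega) (by omega)
  obtain ⟨K2, hK2, hB⟩ :=
    pvBuildB_spec n (p - 1 + (t - 1) * m) hn2 ((p - 1 + (t - 1) * m).toNat + 2) 0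
      (by simp [pvS]; omega)
  have hB' : pvBuildB n (p - 1 + (t - 1) * m) ((p - 1 + (t - 1) * m).toNat + 2) [] 0
      = pvS n K2 := by
    simpa [pvS] using hB
  -- count the hits available in B's prefix
  have hK2' : (p.toNat - 1) + 1 + (t.toNat - 1) * m.toNat ≤ (pvS n K2).length := by
    rw [hpn, hprod] at hK2
    omega
  have hcount2 : t.toNat ≤ (pvHits m.toNat p.toNat 0 (pvS n K2)).length := by
    have := pvHits_len m.toNat p.toNat hpn1 hpmn (pvS n K2) 0 (t.toNat - 1) (by omega)
      (by simp only [pvDist, if_pos (by omega : (0:Nat) ≤ p.toNat - 1)]; omega)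
    omega
  -- B's strided slice is exactly the hit characters
  have hstride : pvEveryN m.toNat ((pvS n K2).drop (p - 1).toNat)
      = pvHits m.toNat p.toNat 0 (pvS n K2) := by
    have hd : (p - 1).toNat = pvDist m.toNat p.toNat 0 := by
      simp only [pvDist, if_pos (by omega : (0:Nat) ≤ p.toNat - 1)]
      omega
    rw [pvHits_eq_everyN m.toNat p.toNat hpn1 hpmn (pvS n K2) 0 (by omega), ← hd]
  have hval : solution_alt n t m p
      = String.ofList (PySem.List.slice (pvEveryN m.toNat
          ((pvBuildB n (p - 1 + (t - 1) * m) ((p - 1 + (t - 1) * m).toNat + 2) [] 0).drop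
            (p - 1).toNat)) none (some t)) := by
    unfold solution_alt
    rw [if_neg (by omega)]
  unfold solution
  rw [hval, hA', hB', hstride, PySem.List.slice_to _ (by omega : (0:Int) ≤ t)]
  exact congrArg String.ofList
    (pvHits_take_stable m.toNat p.toNat t.toNat n K1 K2 hK1 hcount2)

-- ===== VERDICT (by name: the statement is the Claim_ definition above) =====
theorem solution_spec : Claim_equal_solution := by
  unfold Claim_equal_solution
  intro n t m p _hdom hpre
  unfold Spec_solution
  rcases hpre with ⟨hn2, _hn16, hp1, hpm⟩ | ht0
  · by_cases ht : t ≤ 0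
    · rw [solution_A_neg n t m p ht, solution_B_neg n t m p ht]
    · exact solution_eq_pos n t m p hn2 hp1 hpm (by omega)
  · rw [solution_A_neg n t m p ht0, solution_B_neg n t m p ht0]
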